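-- pv_equiv track=rewrite | github.com/Ctwperry/va-disability-claims-manager | va_claims_manager/app/db/schema.py | _parse_trigger_statements
-- ===== SOURCE A (Python) =====
-- def _parse_trigger_statements(sql: str) -> list[str]:
--     """Split a multi-trigger DDL block into individual statements."""
--     statements = []
--     current = []
--     for line in sql.splitlines():
--         stripped = line.strip()
--         if not stripped or stripped.startswith("--"):
--             continue
--         current.append(line)
--         if stripped == "END;":
--             statements.append("\n".join(current))
--             current = []
--     return statements
-- ===== SOURCE B (Python) =====
-- def _keep(line: str) -> bool:
--     stripped = line.strip()
--     return bool(stripped) and not stripped.startswith("--")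
--
--
-- def _parse_trigger_statements(sql: str) -> list[str]:
--     """Split a multi-trigger DDL block into individual statements."""
--     lines = [line for line in sql.splitlines() if _keep(line)]
--     ends = [i for i, line in enumerate(lines) if line.strip() == "END;"]
--     statements = []
--     start = 0
--     for i in ends:
--         statements.append("\n".join(lines[start:i + 1]))
--         start = i + 1
--     return statements
-- ===== Notes on version B (the rewrite author's own statement) =====
-- stated objective: alternative
-- what changed: Replaces A's streaming accumulate-and-flush buffer with a two-pass decomposition: first filter out blank/comment lines, then collect the indices of 'END;' delimiter lines, and finally emit each statement as a join of a slice between consecutive delimiters.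
import Mathlib
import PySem

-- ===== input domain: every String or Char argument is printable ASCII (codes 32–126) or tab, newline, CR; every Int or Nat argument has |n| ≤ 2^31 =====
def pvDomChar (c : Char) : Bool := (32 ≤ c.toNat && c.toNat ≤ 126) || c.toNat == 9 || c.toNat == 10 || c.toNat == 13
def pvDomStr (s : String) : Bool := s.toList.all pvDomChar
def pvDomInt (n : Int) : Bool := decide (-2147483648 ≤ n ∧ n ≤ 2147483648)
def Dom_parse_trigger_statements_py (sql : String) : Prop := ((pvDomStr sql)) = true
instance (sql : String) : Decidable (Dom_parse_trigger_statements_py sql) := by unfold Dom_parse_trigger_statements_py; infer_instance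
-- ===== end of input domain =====

-- B replaces A's streaming accumulate-and-flush buffer by a two-pass filter /
-- delimiter-index / slice decomposition over the same filtered lines (alternative, same cost).


-- ===== PORT A =====
def parse_trigger_statements_py (sql : String) : List String :=
  ((PySem.Str.splitlines sql).foldl
    (fun (st : List String × List String) line =>
      let stripped := PySem.Str.strip line
      if stripped == "" || PySem.Str.startswith stripped "--" then st
      else
        let current := st.2 ++ [line]
        if stripped == "END;" then (st.1 ++ [PySem.Str.join "\n" current], [])
        else (st.1, current))
    ([], [])).1

-- ===== PORT B =====
-- Source B's helper _keep
def pvKeep (line : String) : Bool :=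
  let stripped := PySem.Str.strip line
  !(stripped == "") && !(PySem.Str.startswith stripped "--")

def parse_trigger_statements_py_alt (sql : String) : List String :=
  let lines := (PySem.Str.splitlines sql).filter pvKeep
  let ends := ((PySem.List.enumerate lines 0).filter
      (fun p => PySem.Str.strip p.2 == "END;")).map (fun p => p.1)
  (ends.foldl
    (fun (st : List String × Int) i =>
      (st.1 ++ [PySem.Str.join "\n" (PySem.List.slice lines (some st.2) (some (i + 1)))],
       i + 1))
    ([], 0)).1

-- ===== PRECONDITION & SPEC =====
def Spec_parse_trigger_statements_py (sql : String) (out : List String) : Prop := out = parse_trigger_statements_py_alt sql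
instance (sql : String) (out : List String) : Decidable (Spec_parse_trigger_statements_py sql out) := by unfold Spec_parse_trigger_statements_py; infer_instance

-- ===== CLAIM (what is proved, stated in full; the proofs are below) =====
def Claim_equal_parse_trigger_statements_py : Prop := ∀ (sql : String), Dom_parse_trigger_statements_py sql → Spec_parse_trigger_statements_py sql (parse_trigger_statements_py sql)

-- ===== LEMMAS AND PROOFS =====

-- A's loop body after the skip branch (proof helper)
def pvStepA (st : List String × List String) (line : String) : List String × List String :=
  let current := st.2 ++ [line]
  if PySem.Str.strip line == "END;" then (st.1 ++ [PySem.Str.join "\n" current], [])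
  else (st.1, current)

-- the common grouping both programs compute on the filtered lines (proof helper)
def pvG : List String → List String → List String
  | _, [] => []
  | cur, l :: ls =>
      if PySem.Str.strip l == "END;" then PySem.Str.join "\n" (cur ++ [l]) :: pvG [] ls
      else pvG (cur ++ [l]) ls

-- B's fold body over the delimiter indices (proof helper)
def pvStepB (lines : List String) (st : List String × Int) (i : Int) : List String × Int :=
  (st.1 ++ [PySem.Str.join "\n" (PySem.List.slice lines (some st.2) (some (i + 1)))], i + 1)

-- the delimiter indices of L, enumerated from s (proof helper)
def pvE (s : Int) (L : List String) : List Int :=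
  ((PySem.List.enumerate L s).filter (fun p => PySem.Str.strip p.2 == "END;")).map (fun p => p.1)

theorem pvE_nil (s : Int) : pvE s [] = [] := by
  simp [pvE, PySem.List.enumerate_nil]

theorem pvE_cons (s : Int) (l : String) (ls : List String) :
    pvE s (l :: ls)
      = (if PySem.Str.strip l == "END;" then [s] else []) ++ pvE (s + 1) ls := by
  simp only [pvE, PySem.List.enumerate_cons, List.filter_cons]
  split <;> simp

-- A's fold over all lines equals pvStepA folded over the kept lines
theorem foldA_filter (ls : List String) (st : List String × List String) :
    ls.foldl
      (fun (st : List String × List String) line =>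
        let stripped := PySem.Str.strip line
        if stripped == "" || PySem.Str.startswith stripped "--" then st
        else
          let current := st.2 ++ [line]
          if stripped == "END;" then (st.1 ++ [PySem.Str.join "\n" current], [])
          else (st.1, current)) st
    = (ls.filter pvKeep).foldl pvStepA st := by
  induction ls generalizing st with
  | nil => rfl
  | cons l ls ih =>
      have hcond : (PySem.Str.strip l == "" || PySem.Str.startswith (PySem.Str.strip l) "--")
          = !(pvKeep l) := by
        simp only [pvKeep]
        cases hb : (PySem.Str.strip l == "") <;>
          cases hc : (PySem.Str.startswith (PySem.Str.strip l) "--") <;> rfl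
      by_cases hk : pvKeep l = true
      · rw [List.filter_cons_of_pos hk, List.foldl_cons, List.foldl_cons]
        simp only [hcond, hk, Bool.not_true, Bool.false_eq_true, if_false]
        rw [ih]
        rfl
      · rw [List.filter_cons_of_neg hk, List.foldl_cons]
        have hk' : pvKeep l = false := Bool.eq_false_iff.mpr hk
        simp only [hcond, hk', Bool.not_false, if_true]
        exact ih st

-- pvStepA folded over the kept lines computes pvG
theorem foldA_G (ls stmts cur : List String) :
    (ls.foldl pvStepA (stmts, cur)).1 = stmts ++ pvG cur ls := by
  induction ls generalizing stmts cur with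
  | nil => simp [pvG]
  | cons l ls ih =>
      by_cases he : PySem.Str.strip l == "END;"
      · simp [pvStepA, pvG, he, ih, List.append_assoc]
      · simp [pvStepA, pvG, he, ih]

-- B's fold computes pvG: generalized over a flushed prefix Q and a pending prefix P
theorem foldB_G (L : List String) :
    ∀ (P Q out : List String), (∀ l ∈ P, ¬ (PySem.Str.strip l == "END;") = true) →
    ((pvE ((Q.length : Int) + (P.length : Int)) L).foldl (pvStepB (Q ++ P ++ L)) (out, (Q.length : Int))).1
      = out ++ pvG P L := by
  induction L with
  | nil => intro P Q out _; simp [pvE_nil, pvG]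
  | cons l ls ih =>
      intro P Q out hP
      rw [pvE_cons]
      by_cases he : PySem.Str.strip l == "END;"
      · simp only [he, if_true]
        rw [List.singleton_append, List.foldl_cons]
        have hslice : PySem.List.slice (Q ++ P ++ l :: ls) (some (Q.length : Int))
            (some ((Q.length : Int) + (P.length : Int) + 1)) = P ++ [l] := by
          have h1 : ((Q.length : Int) + (P.length : Int) + 1)
              = ((Q.length + P.length + 1 : Nat) : Int) := by push_cast; ring
          rw [h1, PySem.List.slice_natCast]
          have h2 : (Q ++ P ++ l :: ls).drop Q.length = P ++ l :: ls := by
            rw [List.append_assoc, List.drop_left]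
          rw [h2]
          have h3 : Q.length + P.length + 1 - Q.length = P.length + 1 := by omega
          rw [h3]
          have h4 : P ++ l :: ls = (P ++ [l]) ++ ls := by simp
          have h5 : P.length + 1 = (P ++ [l]).length := by simp
          rw [h4, h5, List.take_left]
        have hQ' : (Q ++ P ++ [l]).length = Q.length + P.length + 1 := by simp; omega
        have := ih [] (Q ++ P ++ [l]) (out ++ [PySem.Str.join "\n" (P ++ [l])]) (by simp)
        rw [hQ'] at this
        simp only [List.append_nil, List.length_nil, Nat.cast_zero, add_zero] at this
        have harr : Q ++ P ++ [l] ++ ls = Q ++ P ++ l :: ls := by simp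
        rw [harr] at this
        have hcast : ((Q.length + P.length + 1 : Nat) : Int) = (Q.length : Int) + (P.length : Int) + 1 := by
          push_cast; ring
        rw [hcast] at this
        simp only [pvStepB, hslice]
        rw [this]
        have hG : pvG P (l :: ls) = PySem.Str.join "\n" (P ++ [l]) :: pvG [] ls := by
          rw [pvG]; simp [he]
        rw [hG]; simp

      · simp only [he, Bool.false_eq_true, if_false, List.nil_append]
        have := ih (P ++ [l]) Q out (by
          intro x hx
          rcases List.mem_append.mp hx with h | h
          · exact hP x h
          · simp at h; subst h; simpa using he)
        have harr : Q ++ (P ++ [l]) ++ ls = Q ++ P ++ l :: ls := by simp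
        rw [harr] at this
        have hlen : ((P ++ [l]).length : Int) = (P.length : Int) + 1 := by simp
        rw [hlen] at this
        have hadd : (Q.length : Int) + (P.length : Int) + 1 = (Q.length : Int) + ((P.length : Int) + 1) := by ring
        rw [hadd, this]
        have hG : pvG P (l :: ls) = pvG (P ++ [l]) ls := by
          rw [pvG]; simp [he]
        rw [hG]

-- ===== VERDICT (by name: the statement is the Claim_ definition above) =====
theorem parse_trigger_statements_py_spec : Claim_equal_parse_trigger_statements_py := by
  intro sql _
  unfold Spec_parse_trigger_statements_py parse_trigger_statements_py parse_trigger_statements_py_alt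
  rw [foldA_filter, foldA_G]
  have := foldB_G ((PySem.Str.splitlines sql).filter pvKeep) [] [] [] (by simp)
  simpa [pvE, pvStepB] using this.symm
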